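-- pv_equiv track=rewrite | github.com/tianhm/gptme | scripts/gh-pr-view-with-pr-comments.py | format_suggestion_diff
-- ===== SOURCE A (Python) =====
-- def format_suggestion_diff(
--     file_content: str, line: int, suggestion: str, context_lines: int = 2
-- ) -> str:
--     """Format a proper diff for a suggestion."""
--     lines = file_content.splitlines()
--
--     # Calculate context ranges
--     start = max(0, line - context_lines - 1)  # -1 because line is 1-indexed
--     end = min(len(lines), line + context_lines)
--
--     # Format as unified diff
--     diff_lines = []
--
--     # Add the diff header (including context lines in the count)
--     num_lines = end - start
--     diff_lines.append(f"@@ -{start+1},{num_lines} +{start+1},{num_lines} @@")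
--
--     # Add context and changes
--     for i in range(start, end):
--         if i == line - 1:  # This is the line being changed
--             diff_lines.append(f"-{lines[i]}")
--             diff_lines.append(f"+{suggestion}")
--         else:  # This is context
--             diff_lines.append(f" {lines[i]}")
--
--     return "\n".join(diff_lines)
-- ===== SOURCE B (Python) =====
-- def format_suggestion_diff(
--     file_content: str, line: int, suggestion: str, context_lines: int = 2
-- ) -> str:
--     """Format a proper diff for a suggestion.
--
--     Recursive formulation: the header string is extended by a recursively built
--     tail; no intermediate list of diff lines and no join are used."""
--     lines = file_content.splitlines()
--     start = max(0, line - context_lines - 1)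
--     end = min(len(lines), line + context_lines)
--
--     def tail(i: int) -> str:
--         # suffix of the diff for indices [i, end), each line preceded by "\n"
--         if i >= end:
--             return ""
--         if i == line - 1:
--             return "\n-" + lines[i] + "\n+" + suggestion + tail(i + 1)
--         return "\n " + lines[i] + tail(i + 1)
--
--     n = end - start
--     return f"@@ -{start+1},{n} +{start+1},{n} @@" + tail(start)
-- ===== Notes on version B (the rewrite author's own statement) =====
-- stated objective: alternative
-- what changed: Replaces A's loop that appends diff lines to a list and joins them at the end with a direct recursion that builds the output string itself, prepending each newline as it goes (no intermediate list, no join).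
import Mathlib
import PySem

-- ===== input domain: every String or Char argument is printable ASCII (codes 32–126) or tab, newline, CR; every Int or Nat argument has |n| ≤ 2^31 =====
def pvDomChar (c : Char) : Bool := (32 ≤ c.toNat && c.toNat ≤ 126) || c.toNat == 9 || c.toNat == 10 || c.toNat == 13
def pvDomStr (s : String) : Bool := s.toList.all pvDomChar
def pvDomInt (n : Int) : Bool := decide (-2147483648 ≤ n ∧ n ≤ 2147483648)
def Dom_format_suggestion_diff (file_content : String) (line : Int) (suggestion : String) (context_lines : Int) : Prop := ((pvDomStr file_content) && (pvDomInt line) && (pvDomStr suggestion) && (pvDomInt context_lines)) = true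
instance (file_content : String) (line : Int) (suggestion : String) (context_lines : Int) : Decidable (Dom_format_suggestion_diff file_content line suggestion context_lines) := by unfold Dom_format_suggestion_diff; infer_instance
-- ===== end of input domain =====

-- B builds the diff by direct recursion over the window, concatenating onto the header
-- string as it goes, instead of A's accumulate-lines-then-join loop; same cost.

-- ===== PORT A =====
def format_suggestion_diff (file_content : String) (line : Int) (suggestion : String) (context_lines : Int) : String :=
  let lines := PySem.Str.splitlines file_content
  let start := max 0 (line - context_lines - 1)
  let end_ := min (lines.length : Int) (line + context_lines)
  let num_lines := end_ - start
  let header := "@@ -" ++ PySem.Int.toStr (start + 1) ++ "," ++ PySem.Int.toStr num_lines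
      ++ " +" ++ PySem.Int.toStr (start + 1) ++ "," ++ PySem.Int.toStr num_lines ++ " @@"
  -- lines[i] is always in range here (start ≤ i < end_ ≤ len), so pyGetD's default is never used
  let diff_lines := (PySem.List.pyRange start end_ 1).foldl
    (fun acc i =>
      if i = line - 1 then
        acc ++ ["-" ++ PySem.List.pyGetD lines i "", "+" ++ suggestion]
      else
        acc ++ [" " ++ PySem.List.pyGetD lines i ""]) [header]
  PySem.Str.join "\n" diff_lines

-- ===== PORT B =====
-- B's helper `tail`: the suffix of the diff for indices [i, end_), each line preceded by "\n"
def fsdTail (lines : List String) (line : Int) (suggestion : String) (end_ : Int) (i : Int) : String :=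
  if h : i ≥ end_ then ""
  else if i = line - 1 then
    "\n-" ++ PySem.List.pyGetD lines i "" ++ "\n+" ++ suggestion ++ fsdTail lines line suggestion end_ (i + 1)
  else
    "\n " ++ PySem.List.pyGetD lines i "" ++ fsdTail lines line suggestion end_ (i + 1)
termination_by (end_ - i).toNat
decreasing_by all_goals (simp at h; omega)

def format_suggestion_diff_alt (file_content : String) (line : Int) (suggestion : String) (context_lines : Int) : String :=
  let lines := PySem.Str.splitlines file_content
  let start := max 0 (line - context_lines - 1)
  let end_ := min (lines.length : Int) (line + context_lines)
  let n := end_ - start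
  "@@ -" ++ PySem.Int.toStr (start + 1) ++ "," ++ PySem.Int.toStr n
      ++ " +" ++ PySem.Int.toStr (start + 1) ++ "," ++ PySem.Int.toStr n ++ " @@"
    ++ fsdTail lines line suggestion end_ start

-- ===== PRECONDITION & SPEC =====
def Spec_format_suggestion_diff (file_content : String) (line : Int) (suggestion : String) (context_lines : Int) (out : String) : Prop := out = format_suggestion_diff_alt file_content line suggestion context_lines
instance (file_content : String) (line : Int) (suggestion : String) (context_lines : Int) (out : String) : Decidable (Spec_format_suggestion_diff file_content line suggestion context_lines out) := by unfold Spec_format_suggestion_diff; infer_instance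

-- ===== CLAIM =====
def Claim_equal_format_suggestion_diff : Prop := ∀ (file_content : String) (line : Int) (suggestion : String) (context_lines : Int), Dom_format_suggestion_diff file_content line suggestion context_lines → Spec_format_suggestion_diff file_content line suggestion context_lines (format_suggestion_diff file_content line suggestion context_lines)

-- ===== LEMMAS AND PROOFS =====

-- pvJ L = each string of L preceded by "\n", concatenated
def pvJ : List String → String
  | [] => ""
  | s :: L => "\n" ++ s ++ pvJ L

theorem pv_join_cons (h : String) (L : List String) :
    PySem.Str.join "\n" (h :: L) = h ++ pvJ L := by
  induction L generalizing h with
  | nil => simp [PySem.Str.join, PySem.Chars.join_singleton, pvJ]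
  | cons s L ih =>
      have step : PySem.Str.join "\n" (h :: s :: L) = h ++ "\n" ++ PySem.Str.join "\n" (s :: L) := by
        simp only [PySem.Str.join, List.map_cons]
        rw [show ("\n" : String).toList = ['\n'] from rfl, PySem.Chars.join_cons_cons,
          String.ofList_append, String.ofList_append]
        simp
      rw [step, ih, pvJ]
      simp [String.append_assoc]

theorem pvJ_append (A B : List String) : pvJ (A ++ B) = pvJ A ++ pvJ B := by
  induction A with
  | nil => simp [pvJ]
  | cons s A ih => simp [pvJ, ih, String.append_assoc]

-- B's recursive tail computes pvJ of exactly the lines A's loop emits over range(i, end_)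
theorem fsdTail_eq (lines : List String) (line : Int) (suggestion : String) (end_ i : Int) :
    fsdTail lines line suggestion end_ i =
      pvJ ((PySem.List.pyRange i end_ 1).flatMap
        (fun j => if j = line - 1 then ["-" ++ PySem.List.pyGetD lines j "", "+" ++ suggestion]
                  else [" " ++ PySem.List.pyGetD lines j ""])) := by
  induction i using fsdTail.induct line end_ with
  | case1 i h =>
      rw [fsdTail, dif_pos h, PySem.List.pyRange_one_eq_nil h]
      rfl
  | case2 h ih =>
      rw [fsdTail, dif_neg h, if_pos rfl,
        PySem.List.pyRange_one_cons (by omega : line - 1 < end_), List.flatMap_cons, pvJ_append,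
        if_pos rfl, ih, pvJ, pvJ, pvJ]
      simp [← String.append_assoc]
  | case3 i h heq ih =>
      rw [fsdTail, dif_neg h, if_neg heq,
        PySem.List.pyRange_one_cons (by omega : i < end_), List.flatMap_cons, pvJ_append,
        if_neg heq, ih, pvJ, pvJ]
      simp [← String.append_assoc]

theorem format_suggestion_diff_eq (file_content : String) (line : Int) (suggestion : String)
    (context_lines : Int) :
    format_suggestion_diff file_content line suggestion context_lines =
      format_suggestion_diff_alt file_content line suggestion context_lines := by
  simp only [format_suggestion_diff, format_suggestion_diff_alt]
  set lines := PySem.Str.splitlines file_content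
  set start := max 0 (line - context_lines - 1)
  set end_ := min ((lines.length : Int)) (line + context_lines)
  have hfun : (fun (acc : List String) (i : Int) =>
        if i = line - 1 then
          acc ++ ["-" ++ PySem.List.pyGetD lines i "", "+" ++ suggestion]
        else
          acc ++ [" " ++ PySem.List.pyGetD lines i ""]) =
      (fun (acc : List String) (i : Int) => acc ++
        (if i = line - 1 then
          ["-" ++ PySem.List.pyGetD lines i "", "+" ++ suggestion]
        else
          [" " ++ PySem.List.pyGetD lines i ""])) := by
    funext acc i; split <;> rfl
  rw [hfun, PySem.List.foldl_append_eq_flatMap, List.singleton_append, pv_join_cons,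
    fsdTail_eq]

-- ===== VERDICT =====
theorem format_suggestion_diff_spec : Claim_equal_format_suggestion_diff := by
  intro file_content line suggestion context_lines _
  exact format_suggestion_diff_eq file_content line suggestion context_lines
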